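-- pv_equiv track=rewrite | github.com/satyam8254/Python-program | python-code/cutRope.py | cutRope
-- ===== SOURCE A (Python) =====
-- def cutRope(A):
--     # Complete this function
--     A.sort()
--     res=[]
--     count=0
--     cuttingLength=A[0]
--     for i in range(1,len(A)):
--         if A[i]>cuttingLength:
--             res.append(len(A)-i)
--         cuttingLength=A[i]
--         count+=1
--     return res
-- ===== SOURCE B (Python) =====
-- def cutRope(A):
--     A.sort()
--     freq = {}
--     for v in A:
--         freq[v] = freq.get(v, 0) + 1
--     keys = sorted(freq)
--     remaining = len(A)
--     res = []
--     for v in keys[:-1]: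
--         remaining -= freq[v]
--         res.append(remaining)
--     return res
-- ===== Notes on version B (the rewrite author's own statement) =====
-- stated objective: alternative
-- what changed: Instead of scanning every adjacent pair of the sorted list for increases, B builds a frequency dict once and walks the sorted distinct values with a running suffix count (remaining -= freq[v]), emitting one entry per distinct value below the maximum.
import Mathlib
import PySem

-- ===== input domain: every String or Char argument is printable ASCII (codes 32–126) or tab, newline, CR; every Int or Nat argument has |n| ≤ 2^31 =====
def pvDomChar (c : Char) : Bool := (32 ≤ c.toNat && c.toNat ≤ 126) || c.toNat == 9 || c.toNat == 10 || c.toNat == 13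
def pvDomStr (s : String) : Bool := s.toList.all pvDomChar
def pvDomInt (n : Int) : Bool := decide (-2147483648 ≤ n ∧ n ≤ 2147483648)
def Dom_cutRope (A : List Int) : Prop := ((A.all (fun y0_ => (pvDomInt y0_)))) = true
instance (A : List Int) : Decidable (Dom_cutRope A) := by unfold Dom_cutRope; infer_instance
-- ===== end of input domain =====

-- B replaces the adjacent-pair scan of the sorted list by a frequency dict and a running
-- suffix count over the sorted distinct values; return values proved equal on nonempty lists
-- (both versions sort the argument in place, so the side effect is identical).

-- ===== PORT A =====
def stepA (S : List Int) (st : List Int × Int × Int) (i : Int) : List Int × Int × Int :=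
  ((if st.2.2 < PySem.List.pyGetD S i 0 then st.1 ++ [(S.length : Int) - i] else st.1),
   st.2.1 + 1, PySem.List.pyGetD S i 0)

def cutRope (A : List Int) : List Int :=
  let S := PySem.List.sorted A (fun x => x) false
  match PySem.List.pyGet? S 0 with
  | none => []  -- Python's first-element access raises IndexError here; excluded by Pre_cutRope
  | some c0 => ((PySem.List.pyRange 1 (S.length : Int) 1).foldl (stepA S) ([], 0, c0)).1

-- ===== PORT B =====
def stepB (freq : PySem.Dict Int Int) (p : Int × List Int) (v : Int) : Int × List Int :=
  (p.1 - freq.getD v 0, p.2 ++ [p.1 - freq.getD v 0])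

def cutRope_alt (A : List Int) : List Int :=
  let S := PySem.List.sorted A (fun x => x) false
  let freq := S.foldl (fun (d : PySem.Dict Int Int) v => d.insert v (d.getD v 0 + 1)) PySem.Dict.empty
  let keys := PySem.List.sorted freq.keys (fun x => x) false
  ((PySem.List.slice keys none (some (-1))).foldl (stepB freq) ((S.length : Int), [])).2

-- ===== PRECONDITION & SPEC =====
-- Pre_ excludes only the empty list, on which A raises IndexError reading the first element (B returns an empty result there).
def Pre_cutRope (A : List Int) : Prop := A ≠ []
instance (A : List Int) : Decidable (Pre_cutRope A) := by unfold Pre_cutRope; infer_instance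
def pvWitness_cutRope : List Int := ([4, 2, 4, 3])

def Spec_cutRope (A : List Int) (out : List Int) : Prop := out = cutRope_alt A
instance (A : List Int) (out : List Int) : Decidable (Spec_cutRope A out) := by unfold Spec_cutRope; infer_instance

-- ===== CLAIM (what is proved, stated in full; the proofs are below) =====
def Claim_equal_cutRope : Prop := ∀ (A : List Int), Dom_cutRope A → Pre_cutRope A → Spec_cutRope A (cutRope A)

-- ===== LEMMAS AND PROOFS =====

-- canonical recursion of A's loop: `prev` is the previous element of the sorted list
def loopA : Int → List Int → List Int
  | _, [] => []
  | prev, x :: xs => (if prev < x then [((xs.length : Int) + 1)] else []) ++ loopA x xs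

-- canonical recursion of B's loop: running remainder minus the count of each key
def loopB (cnt : Int → Int) : Int → List Int → List Int
  | _, [] => []
  | rem, v :: ks => (rem - cnt v) :: loopB cnt (rem - cnt v) ks

-- the sorted distinct values of S
def Ksort (S : List Int) : List Int := PySem.List.sorted (PySem.Set.ofList S) (fun x => x)

theorem slice_none_neg_one (xs : List Int) :
    PySem.List.slice xs none (some (-1)) = xs.dropLast := by
  simp [PySem.List.slice, List.dropLast_eq_take]

theorem foldA_aux (S : List Int) : ∀ (m j : Nat), S.length - j = m → 1 ≤ j →
    ∀ (res : List Int) (cnt prev : Int),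
    ((PySem.List.pyRange (j : Int) (S.length : Int) 1).foldl (stepA S) (res, cnt, prev)).1
      = res ++ loopA prev (S.drop j) := by
  intro m
  induction m with
  | zero =>
    intro j hm _ res cnt prev
    have hj : (S.length : Int) ≤ (j : Int) := by omega
    rw [PySem.List.pyRange_one_eq_nil hj, List.drop_eq_nil_of_le (by omega)]
    simp [loopA]
  | succ m ih =>
    intro j hm hj1 res cnt prev
    have hjn : j < S.length := by omega
    have hcons : PySem.List.pyRange (j : Int) (S.length : Int) 1
        = (j : Int) :: PySem.List.pyRange ((j : Int) + 1) (S.length : Int) 1 :=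
      PySem.List.pyRange_one_cons (by exact_mod_cast hjn)
    have hget : PySem.List.pyGetD S (j : Int) 0 = S[j] := by
      rw [PySem.List.pyGetD_natCast]
      simp [List.getD_eq_getElem?_getD, hjn]
    have hdrop : S.drop j = S[j] :: S.drop (j + 1) := List.drop_eq_getElem_cons hjn
    have hlen : (S.length : Int) - (j : Int) = ((S.drop (j + 1)).length : Int) + 1 := by
      simp [List.length_drop]; omega
    rw [hcons, List.foldl_cons]
    have := ih (j + 1) (by omega) (by omega)
    push_cast at this
    rw [show ((j : Int) + 1) = ((j + 1 : Nat) : Int) by push_cast; ring] at *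
    simp only [stepA, hget]
    rw [this]
    rw [hdrop]
    simp only [loopA, hlen]
    split_ifs with h
    · simp
    · simp

theorem foldB_eq_loopB (freq : PySem.Dict Int Int) : ∀ (ks : List Int) (rem : Int) (res : List Int),
    ((ks.foldl (stepB freq) (rem, res)).2 = res ++ loopB (fun v => freq.getD v 0) rem ks) := by
  intro ks
  induction ks with
  | nil => simp [loopB]
  | cons v ks ih =>
    intro rem res
    simp only [List.foldl_cons, stepB, loopB, ih]
    simp

theorem run_decomp (c : Int) : ∀ (L : List Int), L.Pairwise (· ≤ ·) → (∀ x ∈ L, c ≤ x) →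
    L = List.replicate (L.count c) c ++ L.filter (fun x => decide (c < x)) := by
  intro L
  induction L with
  | nil => simp
  | cons x xs ih =>
    intro hp hlb
    have hx : c ≤ x := hlb x (by simp)
    have hxs : ∀ y ∈ xs, x ≤ y := fun y hy => (List.pairwise_cons.mp hp).1 y hy
    rcases eq_or_lt_of_le hx with heq | hlt
    · rw [← heq]
      have hc : (c :: xs).count c = xs.count c + 1 := by simp
      rw [hc, List.filter_cons]
      simp only [show ¬ (c < c) from lt_irrefl c, decide_false, Bool.false_eq_true, if_false]
      rw [List.replicate_succ, List.cons_append]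
      congr 1
      exact ih ((List.pairwise_cons.mp hp).2) (by rw [← heq] at hxs; exact hxs)
    · have hninxs : c ∉ xs := fun hc => absurd (hxs c hc) (by omega)
      have hcount : (x :: xs).count c = 0 := by
        rw [List.count_cons]
        simp [List.count_eq_zero.mpr hninxs]
        omega
      have hfilter : (x :: xs).filter (fun y => decide (c < y)) = x :: xs := by
        apply List.filter_eq_self.mpr
        intro y hy
        rcases List.mem_cons.mp hy with rfl | hy'
        · simpa using hlt
        · have := hxs y hy'; simp; omega
      rw [hcount, hfilter]; simp

theorem loopA_replicate (c : Int) : ∀ (m : Nat) (rest : List Int),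
    loopA c (List.replicate m c ++ rest) = loopA c rest := by
  intro m
  induction m with
  | zero => simp
  | succ m ih => intro rest; simp [List.replicate_succ, loopA, ih]

theorem mem_Ksort (L : List Int) (y : Int) : y ∈ Ksort L ↔ y ∈ L := by
  simp [Ksort, PySem.List.mem_sorted, PySem.Set.mem_ofList]

theorem nodup_Ksort (L : List Int) : (Ksort L).Nodup :=
  (PySem.List.sorted_perm _ _ _).nodup_iff.mpr (PySem.Set.nodup_ofList _)

theorem pairwise_Ksort (L : List Int) : (Ksort L).Pairwise (· < ·) :=
  PySem.List.sorted_ofList_pairwise_lt _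

theorem Ksort_cons (S : List Int) (c : Int) (hmem : c ∈ S)
    (hlb : ∀ x ∈ S, c ≤ x) :
    Ksort S = c :: Ksort (S.filter (fun x => decide (c < x))) := by
  have hmemK : ∀ y ∈ Ksort (S.filter (fun x => decide (c < x))), c < y := by
    intro y hy
    have : y ∈ S.filter (fun x => decide (c < x)) := (mem_Ksort _ _).mp hy
    simpa using (List.mem_filter.mp this).2
  apply PySem.List.sorted_eq_of_perm_of_pairwise_lt
  · apply (List.perm_ext_iff_of_nodup ?_ (PySem.Set.nodup_ofList S)).mpr
    · intro a
      rw [PySem.Set.mem_ofList, List.mem_cons, mem_Ksort, List.mem_filter]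
      constructor
      · rintro (rfl | ⟨ha, _⟩)
        · exact hmem
        · exact ha
      · intro ha
        rcases eq_or_lt_of_le (hlb a ha) with h | h
        · exact Or.inl h.symm
        · exact Or.inr ⟨ha, by simpa using h⟩
    · exact List.nodup_cons.mpr ⟨fun hc => absurd (hmemK c hc) (lt_irrefl c), nodup_Ksort _⟩
  · exact List.pairwise_cons.mpr ⟨hmemK, pairwise_Ksort _⟩

theorem loopB_congr (f g : Int → Int) : ∀ (ks : List Int) (rem : Int),
    (∀ v ∈ ks, f v = g v) → loopB f rem ks = loopB g rem ks := by
  intro ks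
  induction ks with
  | nil => intro _ _; rfl
  | cons v ks ih =>
    intro rem h
    simp only [loopB, h v (by simp)]
    rw [ih _ (fun w hw => h w (by simp [hw]))]

theorem Ksort_nil : Ksort [] = [] := rfl

theorem core : ∀ (n : Nat) (S : List Int) (c : Int) (t : List Int), S.length ≤ n →
    S.Pairwise (· ≤ ·) → S = c :: t →
    loopB (fun v => (S.count v : Int)) (S.length : Int) (Ksort S).dropLast = loopA c t := by
  intro n
  induction n with
  | zero => intro S c t hlen _ hS; subst hS; simp at hlen
  | succ n ih =>
    intro S c t hlen hp hS
    subst hS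
    have hmem : c ∈ c :: t := by simp
    have hlb : ∀ x ∈ c :: t, c ≤ x := by
      intro x hx
      rcases List.mem_cons.mp hx with rfl | hx'
      · exact le_refl x
      · exact (List.pairwise_cons.mp hp).1 x hx'
    set S' := (c :: t).filter (fun x => decide (c < x)) with hS'def
    have hS'gt : ∀ x ∈ S', c < x := by
      intro x hx; simpa using (List.mem_filter.mp hx).2
    set k := (c :: t).count c with hkdef
    have hdec : c :: t = List.replicate k c ++ S' := run_decomp c (c :: t) hp hlb
    have hk1 : 1 ≤ k := List.count_pos_iff.mpr hmem
    have hK : Ksort (c :: t) = c :: Ksort S' := Ksort_cons _ _ hmem hlb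
    have hlen' : (c :: t).length = k + S'.length := by
      conv_lhs => rw [hdec]
      simp
    have hcnt : ∀ v ∈ S', (c :: t).count v = S'.count v := by
      intro v hv
      conv_lhs => rw [hdec]
      rw [List.count_append, List.count_replicate]
      have hne : ¬ v = c := by have := hS'gt v hv; omega
      rw [if_neg (by simpa using fun h => hne h.symm)]
      simp
    have ht : t = List.replicate (k - 1) c ++ S' := by
      have : List.replicate k c = c :: List.replicate (k - 1) c := by
        rw [← List.replicate_succ]; congr 1; omega
      rw [this] at hdec
      have h2 := hdec
      rw [List.cons_append] at h2
      injection h2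
    rcases hS'nil : S' with _ | ⟨x, t'⟩
    · -- all elements equal c
      rw [hK, hS'nil, Ksort_nil]
      simp only [List.dropLast_singleton, loopB]
      rw [ht, hS'nil, List.append_nil]
      rw [show loopA c (List.replicate (k-1) c) = loopA c (List.replicate (k-1) c ++ []) by simp,
        loopA_replicate]
      rfl
    · have hKS'ne : Ksort S' ≠ [] := by
        intro h
        have : x ∈ Ksort S' := (mem_Ksort _ _).mpr (by rw [hS'nil]; simp)
        simp [h] at this
      rw [hK, List.dropLast_cons_of_ne_nil hKS'ne]
      simp only [loopB]
      have hrem : ((c :: t).length : Int) - ((c :: t).count c : Int) = (S'.length : Int) := by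
        rw [hlen']; push_cast; omega
      rw [hrem]
      have hsub : ∀ v ∈ (Ksort S').dropLast, v ∈ S' := by
        intro v hv
        exact (mem_Ksort _ _).mp (List.dropLast_subset _ hv)
      rw [loopB_congr _ (fun v => (S'.count v : Int)) _ _
        (fun v hv => by rw [hcnt v (hsub v hv)])]
      have hS'p : S'.Pairwise (· ≤ ·) := hp.filter _
      have hS'len : S'.length ≤ n := by
        have := hlen' ▸ hlen; simp at this ⊢; omega
      have hIH := ih S' x t' hS'len hS'p hS'nil
      rw [hS'nil] at hIH ⊢
      rw [hIH]
      -- A side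
      rw [ht, hS'nil, loopA_replicate]
      have hcx : c < x := hS'gt x (by rw [hS'nil]; simp)
      simp only [loopA, if_pos hcx]
      simp


-- ===== VERDICT (by name: the statement is the Claim_ definition above) =====
theorem cutRope_spec : Claim_equal_cutRope := by
  intro A _ hpre
  unfold Spec_cutRope
  have hSne : PySem.List.sorted A (fun x => x) false ≠ [] := by
    intro h
    exact hpre ((PySem.List.sorted_eq_nil_iff A (fun x => x) false).mp h)
  obtain ⟨c, t, hS⟩ : ∃ c t, PySem.List.sorted A (fun x => x) false = c :: t := by
    cases h : PySem.List.sorted A (fun x => x) false with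
    | nil => exact absurd h hSne
    | cons c t => exact ⟨c, t, rfl⟩
  have hp : (PySem.List.sorted A (fun x => x) false).Pairwise (· ≤ ·) :=
    PySem.List.sorted_pairwise A (fun x => x)
  have hget0 : PySem.List.pyGet? (PySem.List.sorted A (fun x => x) false) 0 = some c := by
    rw [hS]; simp [PySem.List.pyGet?, PySem.List.pyIdx?]
  -- A side
  have hA : cutRope A = loopA c t := by
    simp only [cutRope, hget0]
    have h1 := foldA_aux (PySem.List.sorted A (fun x => x) false)
      ((PySem.List.sorted A (fun x => x) false).length - 1) 1 (by rfl) (le_refl 1) [] 0 c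
    push_cast at h1
    rw [h1, hS]
    simp
  -- B side
  have hB : cutRope_alt A
      = loopB (fun v => ((PySem.List.sorted A (fun x => x) false).count v : Int))
          (((PySem.List.sorted A (fun x => x) false).length : Int))
          (Ksort (PySem.List.sorted A (fun x => x) false)).dropLast := by
    simp only [cutRope_alt]
    rw [PySem.Dict.foldl_insert_getD_add_one_eq_counter, PySem.Dict.keys_counter,
      slice_none_neg_one, foldB_eq_loopB]
    rw [loopB_congr _ (fun v => ((PySem.List.sorted A (fun x => x) false).count v : Int)) _ _
      (fun v _ => PySem.Dict.getD_counter _ _)]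
    rfl
  rw [hA, hB]
  exact (core (PySem.List.sorted A (fun x => x) false).length _ c t le_rfl hp hS).symm
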